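-- pv_equiv track=rewrite | github.com/Stefan2004-hub/my-python-app | src/utils/utils.py | find_smallest_interval
-- ===== SOURCE A (Python) =====
-- from typing import List, Optional
--
-- def find_smallest_interval(numbers: List[int]) -> int:
--     """
--     Finds the smallest positive interval between any two numbers.
--     Time Complexity: O(n log n) | Space Complexity: O(n)
--     """
--     # 1. Validation (Equivalent to Java's IllegalArgumentException)
--     if numbers is None:
--         raise ValueError("numbers must not be None")
--
--     if len(numbers) < 2:
--         raise ValueError("numbers must contain at least 2 elements")
--
--     # 2. Sort the list (O(n log n))
--     # sorted() creates a new list, leaving the original untouched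
--     sorted_nums = sorted(numbers)
--
--     # 3. Initialize with infinity
--     min_interval = float("inf")
--
--     # 4. Compare adjacent elements (O(n))
--     for i in range(len(sorted_nums) - 1):
--         current_interval = sorted_nums[i + 1] - sorted_nums[i]
--
--         if current_interval < min_interval:
--             min_interval = current_interval
--
--         # Early exit optimization
--         if min_interval == 0:
--             return 0
--
--     return int(min_interval)
-- ===== SOURCE B (Python) =====
-- def find_smallest_interval(numbers):
--     """Smallest positive gap between any two numbers: naive all-pairs scan."""
--     if numbers is None:
--         raise ValueError("numbers must not be None")
--     if len(numbers) < 2: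
--         raise ValueError("numbers must contain at least 2 elements")
--     best = None
--     for i in range(len(numbers)):
--         for j in range(i + 1, len(numbers)):
--             d = abs(numbers[i] - numbers[j])
--             if best is None or d < best:
--                 best = d
--     return best
-- ===== Notes on version B (the rewrite author's own statement) =====
-- stated objective: alternative
-- what changed: Replaces the sort-then-adjacent-scan with a sort-free naive all-pairs O(n^2) minimum of absolute differences (same exact result, same validation errors).
import Mathlib
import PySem

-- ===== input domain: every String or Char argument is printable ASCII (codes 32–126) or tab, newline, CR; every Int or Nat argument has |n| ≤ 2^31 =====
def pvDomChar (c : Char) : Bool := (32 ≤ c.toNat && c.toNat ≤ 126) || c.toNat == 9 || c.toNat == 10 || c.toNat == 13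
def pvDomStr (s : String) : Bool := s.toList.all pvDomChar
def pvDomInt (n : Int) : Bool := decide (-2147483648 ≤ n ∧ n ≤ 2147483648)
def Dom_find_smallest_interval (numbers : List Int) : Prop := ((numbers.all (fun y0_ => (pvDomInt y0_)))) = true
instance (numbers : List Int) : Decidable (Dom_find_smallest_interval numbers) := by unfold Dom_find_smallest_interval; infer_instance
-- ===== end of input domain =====

-- B replaces A's sort-then-adjacent-scan with a sort-free naive all-pairs minimum of
-- absolute differences (an alternative algorithm of the same result; not claimed faster).

-- ===== PORT A =====
-- running minimum: none models Python's float('inf') start value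
def pvAStep (m : Option Int) (cur : Int) : Option Int :=
  match m with
  | none => some cur
  | some v => if cur < v then some cur else some v

-- the 'for i in range(len(sorted_nums)-1)' loop with the early 'return 0'
def pvALoop (s : List Int) : List Nat → Option Int → Int
  | [], m => match m with | some v => v | none => 0  -- 'none' here = int(float('inf')), unreachable under Pre_
  | i :: rest, m =>
      let cur := s.getD (i+1) 0 - s.getD i 0
      let m' := pvAStep m cur
      if m' = some 0 then 0 else pvALoop s rest m'

def find_smallest_interval (numbers : List Int) : Int :=
  let sorted_nums := PySem.List.sorted numbers (fun x => x) false
  pvALoop sorted_nums (List.range (sorted_nums.length - 1)) none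

-- ===== PORT B =====
-- running minimum: none models Python's 'best = None'
def pvBStep (m : Option Int) (d : Int) : Option Int :=
  match m with
  | none => some d
  | some v => if d < v then some d else some v

def find_smallest_interval_alt (numbers : List Int) : Int :=
  let n := numbers.length
  let best := (List.range n).foldl (fun b i =>
      (List.range' (i+1) (n - (i+1))).foldl
        (fun b j => pvBStep b |numbers.getD i 0 - numbers.getD j 0|) b) none
  match best with | some v => v | none => 0  -- 'none' unreachable under Pre_

-- ===== PRECONDITION & SPEC =====
-- Pre_ excludes exactly the inputs on which A raises ValueError (fewer than 2 elements).
def Pre_find_smallest_interval (numbers : List Int) : Prop := 2 ≤ numbers.length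
instance (numbers : List Int) : Decidable (Pre_find_smallest_interval numbers) := by unfold Pre_find_smallest_interval; infer_instance
def pvWitness_find_smallest_interval : List Int := [3, 1, 7]

def Spec_find_smallest_interval (numbers : List Int) (out : Int) : Prop := out = find_smallest_interval_alt numbers
instance (numbers : List Int) (out : Int) : Decidable (Spec_find_smallest_interval numbers out) := by unfold Spec_find_smallest_interval; infer_instance

-- ===== CLAIM (what is proved, stated in full; the proofs are below) =====
def Claim_equal_find_smallest_interval : Prop := ∀ (numbers : List Int), Dom_find_smallest_interval numbers → Pre_find_smallest_interval numbers → Spec_find_smallest_interval numbers (find_smallest_interval numbers)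

-- ===== LEMMAS AND PROOFS =====

-- the list of adjacent differences A minimises over
def pvAdjD (s : List Int) : List Int :=
  (List.range (s.length - 1)).map (fun i => s.getD (i+1) 0 - s.getD i 0)

-- the list of all-pairs absolute differences B minimises over
def pvPairD (l : List Int) : List Int :=
  (List.range l.length).flatMap (fun i =>
    (List.range' (i+1) (l.length - (i+1))).map (fun j => |l.getD i 0 - l.getD j 0|))

def pvUnwrap : Option Int → Int
  | some v => v
  | none => 0

theorem pvBStep_some (v d : Int) : pvBStep (some v) d = some (min v d) := by
  show (if d < v then some d else some v) = some (min v d)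
  by_cases h : d < v
  · rw [if_pos h, min_eq_right (by omega)]
  · rw [if_neg h, min_eq_left (by omega)]

theorem pvFoldl_pvBStep_some (l : List Int) (v : Int) :
    l.foldl pvBStep (some v) = some (l.foldl min v) := by
  induction l generalizing v with
  | nil => rfl
  | cons d t ih => simp [List.foldl_cons, pvBStep_some, ih]

theorem pvFoldl_pvBStep_none (l : List Int) :
    l.foldl pvBStep none = PySem.List.min? l (fun x => x) := by
  cases l with
  | nil => rfl
  | cons a t =>
      simp [List.foldl_cons, pvBStep, PySem.List.min?_id_cons, pvFoldl_pvBStep_some]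

theorem pvFoldl_pvBStep_some_zero (l : List Int) (h : ∀ d ∈ l, 0 ≤ d) :
    l.foldl pvBStep (some 0) = some 0 := by
  rw [pvFoldl_pvBStep_some]
  congr 1
  induction l with
  | nil => rfl
  | cons d t ih =>
      have hd := h d (by simp)
      simp only [List.foldl_cons]
      rw [min_eq_left hd]
      exact ih (fun x hx => h x (by simp [hx]))

theorem pvALoop_eq_foldl (s : List Int) (idx : List Nat) (m : Option Int)
    (h : ∀ i ∈ idx, 0 ≤ s.getD (i+1) 0 - s.getD i 0) :
    pvALoop s idx m = pvUnwrap ((idx.map (fun i => s.getD (i+1) 0 - s.getD i 0)).foldl pvBStep m) := by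
  induction idx generalizing m with
  | nil => cases m <;> rfl
  | cons i rest ih =>
      simp only [pvALoop, List.map_cons, List.foldl_cons]
      by_cases h0 : pvAStep m (s.getD (i+1) 0 - s.getD i 0) = some 0
      · have hstep : pvBStep m (s.getD (i+1) 0 - s.getD i 0) = some 0 := h0
        rw [if_pos h0, hstep,
          pvFoldl_pvBStep_some_zero _ (by
            intro d hd
            rcases List.mem_map.mp hd with ⟨j, hj, rfl⟩
            exact h j (by simp [hj]))]
        rfl
      · rw [if_neg h0]
        have : pvBStep m (s.getD (i+1) 0 - s.getD i 0) = pvAStep m (s.getD (i+1) 0 - s.getD i 0) := rfl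
        rw [this]
        exact ih _ (fun j hj => h j (by simp [hj]))

theorem pvA_eq_min (numbers : List Int)
    (h : ∀ i ∈ List.range ((PySem.List.sorted numbers (fun x => x) false).length - 1),
      0 ≤ (PySem.List.sorted numbers (fun x => x) false).getD (i+1) 0 - (PySem.List.sorted numbers (fun x => x) false).getD i 0) :
    find_smallest_interval numbers
      = pvUnwrap (PySem.List.min? (pvAdjD (PySem.List.sorted numbers (fun x => x) false)) (fun x => x)) := by
  unfold find_smallest_interval pvAdjD
  rw [pvALoop_eq_foldl _ _ _ h, pvFoldl_pvBStep_none]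

-- nested loop = fold over the flattened candidate list
theorem pv_nested (h : Nat → List Int) (L : List Nat) (b : Option Int) :
    L.foldl (fun b i => (h i).foldl pvBStep b) b = (L.flatMap h).foldl pvBStep b := by
  induction L generalizing b with
  | nil => rfl
  | cons i t ih => simp only [List.foldl_cons, List.flatMap_cons, List.foldl_append, ih]

theorem pvB_eq_min (numbers : List Int) :
    find_smallest_interval_alt numbers = pvUnwrap (PySem.List.min? (pvPairD numbers) (fun x => x)) := by
  show pvUnwrap ((List.range numbers.length).foldl (fun b i =>
      (List.range' (i+1) (numbers.length - (i+1))).foldl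
        (fun b j => pvBStep b |numbers.getD i 0 - numbers.getD j 0|) b) none) = _
  rw [← pvFoldl_pvBStep_none]
  congr 1
  have hinner : ∀ (i : Nat) (b : Option Int),
      (List.range' (i+1) (numbers.length - (i+1))).foldl
        (fun b j => pvBStep b |numbers.getD i 0 - numbers.getD j 0|) b
      = (((List.range' (i+1) (numbers.length - (i+1))).map
          (fun j => |numbers.getD i 0 - numbers.getD j 0|)).foldl pvBStep b) := by
    intro i b
    rw [List.foldl_map]
  calc (List.range numbers.length).foldl (fun b i =>
      (List.range' (i+1) (numbers.length - (i+1))).foldl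
        (fun b j => pvBStep b |numbers.getD i 0 - numbers.getD j 0|) b) none
      = (List.range numbers.length).foldl (fun b i =>
        (((List.range' (i+1) (numbers.length - (i+1))).map
          (fun j => |numbers.getD i 0 - numbers.getD j 0|)).foldl pvBStep b)) none := by
        have hfun : (fun (b : Option Int) (i : Nat) =>
            (List.range' (i+1) (numbers.length - (i+1))).foldl
              (fun b j => pvBStep b |numbers.getD i 0 - numbers.getD j 0|) b)
          = (fun (b : Option Int) (i : Nat) =>
            (((List.range' (i+1) (numbers.length - (i+1))).map
              (fun j => |numbers.getD i 0 - numbers.getD j 0|)).foldl pvBStep b)) :=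
          funext fun b => funext fun i => hinner i b
        rw [hfun]
    _ = _ := by
        rw [pv_nested (fun i => (List.range' (i+1) (numbers.length - (i+1))).map
          (fun j => |numbers.getD i 0 - numbers.getD j 0|)) (List.range numbers.length) none]
        rfl

-- ==== index/count helpers ====

theorem pv_two_idx_of_count (l : List Int) (x : Int) (h : 2 ≤ l.count x) :
    ∃ p q, p < q ∧ q < l.length ∧ l.getD p 0 = x ∧ l.getD q 0 = x := by
  induction l with
  | nil => simp at h
  | cons a t ih =>
      by_cases hax : a = x
      · subst hax
        rw [List.count_cons_self] at h
        have hx : a ∈ t := List.count_pos_iff.mp (by omega)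
        rcases List.mem_iff_getElem.mp hx with ⟨q', hq', hget⟩
        refine ⟨0, q' + 1, by omega, by simp; omega, by simp, ?_⟩
        rw [List.getD_cons_succ, List.getD_eq_getElem _ 0 hq']
        exact hget
      · have h2 : 2 ≤ t.count x := by
          rw [List.count_cons] at h
          rw [if_neg (fun hc => hax (eq_of_beq hc))] at h
          omega
        rcases ih h2 with ⟨p, q, hpq, hq, hp1, hq1⟩
        refine ⟨p + 1, q + 1, by omega, by simp; omega, ?_, ?_⟩
        · rw [List.getD_cons_succ]; exact hp1
        · rw [List.getD_cons_succ]; exact hq1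

theorem pv_count_of_two_idx (l : List Int) (x : Int) (p q : Nat)
    (hpq : p < q) (hq : q < l.length) (hp1 : l.getD p 0 = x) (hq1 : l.getD q 0 = x) :
    2 ≤ l.count x := by
  induction l generalizing p q with
  | nil => simp at hq
  | cons a t ih =>
      cases p with
      | zero =>
          rw [List.getD_cons_zero] at hp1
          cases q with
          | zero => omega
          | succ q' =>
              have hq' : q' < t.length := by simp at hq; omega
              have hmem : x ∈ t := by
                rw [← hq1, List.getD_cons_succ, List.getD_eq_getElem _ 0 hq']
                exact List.getElem_mem hq'
              have hpos := List.count_pos_iff.mpr hmem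
              subst hp1
              rw [List.count_cons_self]
              omega
      | succ p' =>
          cases q with
          | zero => omega
          | succ q' =>
              have h := ih p' q' (by omega) (by simp at hq; omega)
                (by rw [← hp1, List.getD_cons_succ])
                (by rw [← hq1, List.getD_cons_succ])
              rw [List.count_cons]
              split <;> omega

theorem pv_idx_of_mem (l : List Int) (x : Int) (h : x ∈ l) :
    ∃ i, i < l.length ∧ l.getD i 0 = x := by
  rcases List.mem_iff_getElem.mp h with ⟨i, hi, hget⟩
  exact ⟨i, hi, by rw [List.getD_eq_getElem _ 0 hi]; exact hget⟩

-- ==== membership in the two candidate lists ====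

theorem pv_mem_adjD (s : List Int) (k : Nat) (hk : k + 1 < s.length) :
    s.getD (k+1) 0 - s.getD k 0 ∈ pvAdjD s := by
  unfold pvAdjD
  exact List.mem_map.mpr ⟨k, List.mem_range.mpr (by omega), rfl⟩

theorem pv_adjD_elim (s : List Int) (d : Int) (h : d ∈ pvAdjD s) :
    ∃ k, k + 1 < s.length ∧ d = s.getD (k+1) 0 - s.getD k 0 := by
  unfold pvAdjD at h
  rcases List.mem_map.mp h with ⟨k, hk, rfl⟩
  exact ⟨k, by have := List.mem_range.mp hk; omega, rfl⟩

theorem pv_mem_pairD (l : List Int) (i j : Nat) (hij : i < j) (hj : j < l.length) :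
    |l.getD i 0 - l.getD j 0| ∈ pvPairD l := by
  unfold pvPairD
  refine List.mem_flatMap.mpr ⟨i, List.mem_range.mpr (by omega), ?_⟩
  exact List.mem_map.mpr ⟨j, List.mem_range'_1.mpr ⟨by omega, by omega⟩, rfl⟩

theorem pv_pairD_elim (l : List Int) (d : Int) (h : d ∈ pvPairD l) :
    ∃ i j, i < j ∧ j < l.length ∧ d = |l.getD i 0 - l.getD j 0| := by
  unfold pvPairD at h
  rcases List.mem_flatMap.mp h with ⟨i, hi, hmem⟩
  rcases List.mem_map.mp hmem with ⟨j, hj, rfl⟩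
  rcases List.mem_range'_1.mp hj with ⟨hj1, hj2⟩
  exact ⟨i, j, by omega, by have := List.mem_range.mp hi; omega, rfl⟩

-- ==== order facts about the sorted list ====

theorem pv_sorted_mono (s : List Int) (hs : s.Pairwise (· ≤ ·)) (p q : Nat)
    (hpq : p ≤ q) (hq : q < s.length) : s.getD p 0 ≤ s.getD q 0 := by
  rcases Nat.eq_or_lt_of_le hpq with rfl | hlt
  · exact le_refl _
  · rw [List.getD_eq_getElem _ 0 (by omega), List.getD_eq_getElem _ 0 hq]
    exact List.pairwise_iff_getElem.mp hs p q (by omega) hq hlt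

-- telescoping: the minimal adjacent gap bounds every increasing-index gap
theorem pv_telescope (s : List Int) (hs : s.Pairwise (· ≤ ·)) (a : Int)
    (ha : PySem.List.min? (pvAdjD s) (fun x => x) = some a)
    (p q : Nat) (hpq : p < q) (hq : q < s.length) :
    a ≤ s.getD q 0 - s.getD p 0 := by
  induction q with
  | zero => omega
  | succ q' ih =>
      have hle : a ≤ s.getD (q'+1) 0 - s.getD q' 0 :=
        PySem.List.min?_isMin (key := fun x => x) ha _ (pv_mem_adjD s q' hq)
      rcases Nat.lt_or_ge p q' with h1 | h2
      · have := ih h1 (by omega)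
        have hmono : s.getD q' 0 ≤ s.getD (q'+1) 0 := pv_sorted_mono s hs q' (q'+1) (by omega) hq
        omega
      · have hpq' : p = q' := by omega
        subst hpq'
        exact hle

-- ==== the two minima bound each other ====

theorem pv_a_le_pair (numbers : List Int) (a b : Int)
    (ha : PySem.List.min? (pvAdjD (PySem.List.sorted numbers (fun x => x) false)) (fun x => x) = some a)
    (hb : b ∈ pvPairD numbers) : a ≤ b := by
  set s := PySem.List.sorted numbers (fun x => x) false with hsdef
  have hperm : s.Perm numbers := PySem.List.sorted_perm numbers (fun x => x) false
  have hs : s.Pairwise (· ≤ ·) := by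
    have := PySem.List.sorted_pairwise numbers (fun x => x)
    simpa using this
  rcases pv_pairD_elim numbers b hb with ⟨i, j, hij, hj, rfl⟩
  set x := numbers.getD i 0 with hx
  set y := numbers.getD j 0 with hy
  by_cases hxy : x = y
  · -- duplicate value: two equal entries survive into the sorted list
    have hcnt : 2 ≤ numbers.count x :=
      pv_count_of_two_idx numbers x i j hij hj rfl (by rw [hxy])
    have hcnt' : 2 ≤ s.count x := by rw [hperm.count_eq]; exact hcnt
    rcases pv_two_idx_of_count s x hcnt' with ⟨p, q, hpq, hq, hp1, hq1⟩
    have := pv_telescope s hs a ha p q hpq hq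
    rw [hp1, hq1] at this
    simp [hxy] at *
    omega
  · -- distinct values: both occur in the sorted list, smaller one first
    have hxs : x ∈ s := hperm.mem_iff.mpr (by
      rw [hx, List.getD_eq_getElem _ 0 (by omega)]; exact List.getElem_mem _)
    have hys : y ∈ s := hperm.mem_iff.mpr (by
      rw [hy, List.getD_eq_getElem _ 0 hj]; exact List.getElem_mem _)
    rcases pv_idx_of_mem s x hxs with ⟨px, hpx, hpx1⟩
    rcases pv_idx_of_mem s y hys with ⟨py, hpy, hpy1⟩
    rcases lt_trichotomy x y with hlt | heq | hgt
    · have hidx : px < py := by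
        by_contra hle
        have := pv_sorted_mono s hs py px (by omega) hpx
        rw [hpx1, hpy1] at this; omega
      have := pv_telescope s hs a ha px py hidx hpy
      rw [hpx1, hpy1] at this
      rw [abs_sub_comm]
      rw [abs_of_nonneg (by omega)]
      omega
    · exact absurd heq hxy
    · have hidx : py < px := by
        by_contra hle
        have := pv_sorted_mono s hs px py (by omega) hpy
        rw [hpx1, hpy1] at this; omega
      have := pv_telescope s hs a ha py px hidx hpx
      rw [hpx1, hpy1] at this
      rw [abs_of_nonneg (by omega)]
      omega

theorem pv_b_le_adj (numbers : List Int) (b d : Int)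
    (hb : PySem.List.min? (pvPairD numbers) (fun x => x) = some b)
    (hd : d ∈ pvAdjD (PySem.List.sorted numbers (fun x => x) false)) : b ≤ d := by
  set s := PySem.List.sorted numbers (fun x => x) false with hsdef
  have hperm : s.Perm numbers := PySem.List.sorted_perm numbers (fun x => x) false
  have hs : s.Pairwise (· ≤ ·) := by
    have := PySem.List.sorted_pairwise numbers (fun x => x)
    simpa using this
  rcases pv_adjD_elim s d hd with ⟨k, hk, rfl⟩
  set x := s.getD k 0 with hx
  set y := s.getD (k+1) 0 with hy
  have hxy : x ≤ y := pv_sorted_mono s hs k (k+1) (by omega) hk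
  by_cases heq : x = y
  · -- duplicate value in s → duplicate in numbers → 0 is a pair difference
    have hcnt : 2 ≤ s.count x :=
      pv_count_of_two_idx s x k (k+1) (by omega) hk rfl (by rw [heq])
    have hcnt' : 2 ≤ numbers.count x := by rw [← hperm.count_eq]; exact hcnt
    rcases pv_two_idx_of_count numbers x hcnt' with ⟨p, q, hpq, hq, hp1, hq1⟩
    have hmem := pv_mem_pairD numbers p q hpq hq
    rw [hp1, hq1] at hmem
    have := PySem.List.min?_isMin (key := fun x => x) hb _ hmem
    simp at this
    omega
  · -- distinct values x < y occur somewhere in numbers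
    have hxn : x ∈ numbers := hperm.mem_iff.mp (by
      rw [hx, List.getD_eq_getElem _ 0 (by omega)]; exact List.getElem_mem _)
    have hyn : y ∈ numbers := hperm.mem_iff.mp (by
      rw [hy, List.getD_eq_getElem _ 0 hk]; exact List.getElem_mem _)
    rcases pv_idx_of_mem numbers x hxn with ⟨ix, hix, hix1⟩
    rcases pv_idx_of_mem numbers y hyn with ⟨iy, hiy, hiy1⟩
    have hne : ix ≠ iy := by
      intro hcon; rw [hcon, hiy1] at hix1; exact heq hix1.symm
    rcases Nat.lt_or_ge ix iy with hlt | hge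
    · have hmem := pv_mem_pairD numbers ix iy hlt hiy
      rw [hix1, hiy1] at hmem
      have := PySem.List.min?_isMin (key := fun x => x) hb _ hmem
      simp at this
      rw [abs_sub_comm, abs_of_nonneg (by omega)] at this
      omega
    · have hlt' : iy < ix := by omega
      have hmem := pv_mem_pairD numbers iy ix hlt' hix
      rw [hix1, hiy1] at hmem
      have := PySem.List.min?_isMin (key := fun x => x) hb _ hmem
      simp at this
      rw [abs_of_nonneg (by omega)] at this
      omega

-- ===== VERDICT (by name: the statement is the Claim_ definition above) =====
theorem find_smallest_interval_spec : Claim_equal_find_smallest_interval := by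
  intro numbers _ hpre
  have hpre' : 2 ≤ numbers.length := hpre
  unfold Spec_find_smallest_interval
  set s := PySem.List.sorted numbers (fun x => x) false with hsdef
  have hs : s.Pairwise (· ≤ ·) := by
    have := PySem.List.sorted_pairwise numbers (fun x => x)
    simpa using this
  have hlen : s.length = numbers.length := by
    rw [hsdef]; simp
  have hnonneg : ∀ i ∈ List.range (s.length - 1), 0 ≤ s.getD (i+1) 0 - s.getD i 0 := by
    intro i hi
    have hi' := List.mem_range.mp hi
    have := pv_sorted_mono s hs i (i+1) (by omega) (by omega)
    omega
  rw [pvA_eq_min numbers hnonneg, pvB_eq_min numbers]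
  -- both candidate lists are nonempty, so both minima exist
  have hadj_ne : pvAdjD s ≠ [] := by
    have : s.getD 1 0 - s.getD 0 0 ∈ pvAdjD s := pv_mem_adjD s 0 (by omega)
    intro hcon; rw [hcon] at this; exact absurd this (List.not_mem_nil)
  have hpair_ne : pvPairD numbers ≠ [] := by
    have : |numbers.getD 0 0 - numbers.getD 1 0| ∈ pvPairD numbers :=
      pv_mem_pairD numbers 0 1 (by omega) (by omega)
    intro hcon; rw [hcon] at this; exact absurd this (List.not_mem_nil)
  obtain ⟨a, ha⟩ : ∃ a, PySem.List.min? (pvAdjD s) (fun x => x) = some a := by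
    cases hL : pvAdjD s with
    | nil => exact absurd hL hadj_ne
    | cons y t => exact ⟨t.foldl min y, by simp only [hL, PySem.List.min?_id_cons]⟩
  obtain ⟨b, hb⟩ : ∃ b, PySem.List.min? (pvPairD numbers) (fun x => x) = some b := by
    cases hL : pvPairD numbers with
    | nil => exact absurd hL hpair_ne
    | cons y t => exact ⟨t.foldl min y, by simp only [hL, PySem.List.min?_id_cons]⟩
  rw [ha, hb]
  have h1 : a ≤ b := pv_a_le_pair numbers a b (by rw [← hsdef]; exact ha) (PySem.List.min?_mem hb)
  have h2 : b ≤ a := pv_b_le_adj numbers b a hb (PySem.List.min?_mem (by rw [← hsdef]; exact ha))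
  have : a = b := le_antisymm h1 h2
  rw [this]
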